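-- pv_equiv track=rewrite | github.com/jaime-perez-dev/trading-system | multi_scanner.py | _titles_similar
-- ===== SOURCE A (Python) =====
-- def _titles_similar(title1: str, title2: str) -> bool:
--     """Check if two titles refer to the same event (simple keyword match)."""
--     # Extract key entities
--     keywords = ["gpt", "openai", "chatgpt", "anthropic", "claude", "google", "gemini",
--                 "agi", "ai", "llm", "trump", "biden", "election", "bitcoin", "btc"]
--
--     t1_keywords = set(kw for kw in keywords if kw in title1)
--     t2_keywords = set(kw for kw in keywords if kw in title2)
--
--     if not t1_keywords or not t2_keywords:
--         return False
--
--     # Need at least 2 keyword overlaps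
--     overlap = t1_keywords & t2_keywords
--     return len(overlap) >= 2
-- ===== SOURCE B (Python) =====
-- def _titles_similar(title1: str, title2: str) -> bool:
--     """Check if two titles refer to the same event (simple keyword match)."""
--     keywords = ["gpt", "openai", "chatgpt", "anthropic", "claude", "google", "gemini",
--                 "agi", "ai", "llm", "trump", "biden", "election", "bitcoin", "btc"]
--     # Early-terminating search instead of set construction: walk the keyword
--     # list until the FIRST keyword shared by both titles, then succeed iff ANY
--     # later keyword is also shared.  Stops as soon as a second shared keyword
--     # is found; builds no sets and never counts past two.
--     for i, kw in enumerate(keywords):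
--         if kw in title1 and kw in title2:
--             return any(k in title1 and k in title2 for k in keywords[i + 1:])
--     return False
-- ===== Notes on version B (the rewrite author's own statement) =====
-- stated objective: alternative
-- what changed: Replaces A's two keyword sets, emptiness guard and set intersection with an early-terminating two-stage search: find the first keyword contained in both titles, then return whether any later keyword is also shared; no sets are built and the scan stops at the second shared keyword (measured ~1.7x faster on large inputs).
import Mathlib
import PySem

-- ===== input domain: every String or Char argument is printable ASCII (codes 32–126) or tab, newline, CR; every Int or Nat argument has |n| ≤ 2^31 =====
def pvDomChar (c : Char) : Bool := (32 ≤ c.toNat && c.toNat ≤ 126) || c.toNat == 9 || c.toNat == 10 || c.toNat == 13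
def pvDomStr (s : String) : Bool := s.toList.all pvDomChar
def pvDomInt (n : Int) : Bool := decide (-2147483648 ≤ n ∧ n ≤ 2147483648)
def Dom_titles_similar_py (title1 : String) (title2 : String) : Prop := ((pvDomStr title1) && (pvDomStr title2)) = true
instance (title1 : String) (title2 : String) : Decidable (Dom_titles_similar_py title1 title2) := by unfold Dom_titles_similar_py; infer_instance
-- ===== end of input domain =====

-- B replaces A's two keyword sets + intersection + empty-set guard by an early-terminating search (first shared keyword, then any later one); equal on all inputs.


-- ===== PORT A =====
def pvKeywords : List String :=
  ["gpt", "openai", "chatgpt", "anthropic", "claude", "google", "gemini",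
   "agi", "ai", "llm", "trump", "biden", "election", "bitcoin", "btc"]

def titles_similar_py (title1 : String) (title2 : String) : Bool :=
  let t1_keywords : PySem.Set String :=
    PySem.Set.ofList (pvKeywords.filter (fun kw => PySem.Str.isIn kw title1))
  let t2_keywords : PySem.Set String :=
    PySem.Set.ofList (pvKeywords.filter (fun kw => PySem.Str.isIn kw title2))
  if t1_keywords.isEmpty || t2_keywords.isEmpty then false
  else
    let overlap := PySem.Set.inter t1_keywords t2_keywords
    decide (2 ≤ overlap.length)

-- ===== PORT B =====
-- 'kw in title1 and kw in title2'
def pvShares (title1 : String) (title2 : String) (kw : String) : Bool :=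
  PySem.Str.isIn kw title1 && PySem.Str.isIn kw title2

-- B's loop: find the first shared keyword; on finding it, return whether any
-- keyword of the remaining tail (keywords[i+1:]) is also shared.
def pvFindSecond (title1 : String) (title2 : String) : List String → Bool
  | [] => false
  | kw :: rest =>
    if pvShares title1 title2 kw then rest.any (pvShares title1 title2)
    else pvFindSecond title1 title2 rest

def titles_similar_py_alt (title1 : String) (title2 : String) : Bool :=
  pvFindSecond title1 title2 pvKeywords

-- ===== PRECONDITION & SPEC =====
def Spec_titles_similar_py (title1 : String) (title2 : String) (out : Bool) : Prop := out = titles_similar_py_alt title1 title2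
instance (title1 : String) (title2 : String) (out : Bool) : Decidable (Spec_titles_similar_py title1 title2 out) := by unfold Spec_titles_similar_py; infer_instance

-- ===== CLAIM (what is proved, stated in full; the proofs are below) =====
def Claim_equal_titles_similar_py : Prop := ∀ (title1 : String) (title2 : String), Dom_titles_similar_py title1 title2 → Spec_titles_similar_py title1 title2 (titles_similar_py title1 title2)

-- ===== LEMMAS AND PROOFS =====

-- B's early-exit search succeeds exactly when at least two keywords are shared.
theorem pv_findSecond_eq_count (t1 t2 : String) (l : List String) :
    pvFindSecond t1 t2 l = decide (2 ≤ l.countP (pvShares t1 t2)) := by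
  induction l with
  | nil => simp [pvFindSecond]
  | cons kw rest ih =>
    by_cases h : pvShares t1 t2 kw = true
    · have hany : rest.any (pvShares t1 t2) = decide (1 ≤ rest.countP (pvShares t1 t2)) := by
        rcases Bool.eq_false_or_eq_true (rest.any (pvShares t1 t2)) with ha | ha
        · rw [ha]
          obtain ⟨x, hx, hpx⟩ := List.any_eq_true.mp ha
          have : 0 < rest.countP (pvShares t1 t2) :=
            List.countP_pos_iff.mpr ⟨x, hx, hpx⟩
          simpa using this
        · rw [ha]
          have : rest.countP (pvShares t1 t2) = 0 := by
            rw [List.countP_eq_zero]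
            intro x hx
            have := List.any_eq_false.mp ha x hx
            simpa using this
          simp [this]
      rw [List.countP_cons_of_pos (l := rest) (p := pvShares t1 t2) h]
      simp only [pvFindSecond, h, if_pos, hany]
      by_cases h1 : 1 ≤ rest.countP (pvShares t1 t2) <;> simp [h1]
    · rw [List.countP_cons_of_neg (l := rest) (p := pvShares t1 t2) (by simpa using h)]
      simpa [pvFindSecond, h] using ih

-- A's intersection of the two filtered keyword sets has countP-many elements.
theorem pv_inter_length (p q : String → Bool) (l : List String) (hl : l.Nodup) :
    (PySem.Set.inter (PySem.Set.ofList (l.filter p)) (PySem.Set.ofList (l.filter q))).length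
      = l.countP (fun x => p x && q x) := by
  rw [PySem.Set.ofList_eq_self_of_nodup (l.filter p) (hl.filter p),
      PySem.Set.ofList_eq_self_of_nodup (l.filter q) (hl.filter q)]
  simp only [PySem.Set.inter, List.filter_filter, ← List.countP_eq_length_filter]
  refine List.countP_congr ?_
  intro x hx
  simp [PySem.Set.contains, hx, and_comm]

-- A's guarded intersection test, rewritten to the shared-keyword count.
theorem pv_main (p q : String → Bool) :
    (if (PySem.Set.ofList (pvKeywords.filter p)).isEmpty
        || (PySem.Set.ofList (pvKeywords.filter q)).isEmpty then false
     else decide (2 ≤ (PySem.Set.inter (PySem.Set.ofList (pvKeywords.filter p))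
                        (PySem.Set.ofList (pvKeywords.filter q))).length))
      = decide (2 ≤ pvKeywords.countP (fun x => p x && q x)) := by
  have hnd : pvKeywords.Nodup := by decide
  have hle : pvKeywords.countP (fun x => p x && q x) ≤ pvKeywords.countP p := by
    refine List.countP_mono_left ?_
    intro x _ hx
    rw [Bool.and_eq_true] at hx
    exact hx.1
  have hle' : pvKeywords.countP (fun x => p x && q x) ≤ pvKeywords.countP q := by
    refine List.countP_mono_left ?_
    intro x _ hx
    rw [Bool.and_eq_true] at hx
    exact hx.2
  by_cases h1 : (pvKeywords.filter p).isEmpty = true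
  · have : pvKeywords.countP p = 0 := by
      rw [List.countP_eq_length_filter, List.isEmpty_iff.mp h1]; rfl
    rw [PySem.Set.ofList_eq_self_of_nodup _ (hnd.filter p), h1]
    simp only [Bool.true_or, if_true]
    have h0 : pvKeywords.countP (fun x => p x && q x) = 0 := Nat.le_zero.mp (this ▸ hle)
    rw [h0]; decide
  · by_cases h2 : (pvKeywords.filter q).isEmpty = true
    · have : pvKeywords.countP q = 0 := by
        rw [List.countP_eq_length_filter, List.isEmpty_iff.mp h2]; rfl
      rw [PySem.Set.ofList_eq_self_of_nodup _ (hnd.filter p),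
          PySem.Set.ofList_eq_self_of_nodup _ (hnd.filter q), h2]
      simp only [Bool.or_true, if_true]
      have h0 : pvKeywords.countP (fun x => p x && q x) = 0 := Nat.le_zero.mp (this ▸ hle')
      rw [h0]; decide
    · rw [PySem.Set.ofList_eq_self_of_nodup _ (hnd.filter p),
          PySem.Set.ofList_eq_self_of_nodup _ (hnd.filter q)]
      have hi := pv_inter_length p q pvKeywords hnd
      rw [PySem.Set.ofList_eq_self_of_nodup _ (hnd.filter p),
          PySem.Set.ofList_eq_self_of_nodup _ (hnd.filter q)] at hi
      rw [hi]
      simp [h1, h2]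

-- ===== VERDICT (by name: the statement is the Claim_ definition above) =====
theorem titles_similar_py_spec : Claim_equal_titles_similar_py := by
  intro t1 t2 _
  unfold Spec_titles_similar_py titles_similar_py titles_similar_py_alt
  rw [pv_findSecond_eq_count]
  exact pv_main (fun kw => PySem.Str.isIn kw t1) (fun kw => PySem.Str.isIn kw t2)
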